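-- pv_equiv track=rewrite | github.com/highfestiva/life | Impuzzable/script/asc.py | crop_chars
-- ===== SOURCE A (Python) =====
-- def _drop_empty_head_tail(chars):
-- 	o,chars = None,list(chars)
-- 	while o != chars:
-- 		o = chars
-- 		if not list(filter(lambda s:s.strip(),chars[0])):
-- 			chars = chars[1:]
-- 		if not list(filter(lambda s:s.strip(),chars[-1])):
-- 			chars = chars[:-1]
-- 	return chars
--
-- def crop_chars(chars):
-- 	tallest_layer = max(len(layer) for layer in chars)
-- 	longest_line = max(len(row) for layer in chars for row in layer)
-- 	chars = [layer+['']*(tallest_layer-len(layer)) for layer in chars]	# Make all layers equally tall.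
-- 	chars = [[line.ljust(longest_line) for line in layer] for layer in chars]	# Make all rows equally long.
-- 	chars = _drop_empty_head_tail(chars)		# Drop empty layers in front and back.
-- 	xpose = _drop_empty_head_tail(zip(*chars))	# Transpose layers ('deep' instead of 'high'), drop empty rows on top and bottom.
-- 	xpose = [[''.join(s) for s in zip(*layer)] for layer in zip(*xpose)]	# Transpose back to front-to-back layers, then turn rows into columns.
-- 	xpose = _drop_empty_head_tail(zip(*xpose))	# Transform to place all columns together, drop empty left-most columns.
-- 	chars = [[''.join(s) for s in zip(*cols)] for cols in zip(*xpose)]	# Transform back to layers, columns turn back into rows.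
-- 	return chars
-- ===== SOURCE B (Python) =====
-- def _span(flags):
--     i = flags.index(True)
--     j = len(flags) - 1 - flags[::-1].index(True)
--     return i, j
--
-- def crop_chars(chars):
--     H = max(len(layer) for layer in chars)
--     W = max(len(row) for layer in chars for row in layer)
--     grid = [[row.ljust(W) for row in layer] + [' ' * W] * (H - len(layer)) for layer in chars]
--     zmask = [any(not c.isspace() for row in layer for c in row) for layer in grid]
--     ymask = [any(not layer[y][x].isspace() for layer in grid for x in range(W)) for y in range(H)]
--     xmask = [any(not layer[y][x].isspace() for layer in grid for y in range(H)) for x in range(W)]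
--     z0, z1 = _span(zmask)
--     y0, y1 = _span(ymask)
--     x0, x1 = _span(xmask)
--     return [[row[x0:x1 + 1] for row in layer[y0:y1 + 1]] for layer in grid[z0:z1 + 1]]
-- ===== Notes on version B (the rewrite author's own statement) =====
-- stated objective: faster
-- what changed: Instead of repeatedly slicing off empty head/tail slices inside a fixpoint loop interleaved with four zip(*...) transpositions, B pads once, computes one occupancy mask per axis in a single pass over the grid, finds the first/last True index of each mask, and returns the sub-box by three nested slices.
import Mathlib
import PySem

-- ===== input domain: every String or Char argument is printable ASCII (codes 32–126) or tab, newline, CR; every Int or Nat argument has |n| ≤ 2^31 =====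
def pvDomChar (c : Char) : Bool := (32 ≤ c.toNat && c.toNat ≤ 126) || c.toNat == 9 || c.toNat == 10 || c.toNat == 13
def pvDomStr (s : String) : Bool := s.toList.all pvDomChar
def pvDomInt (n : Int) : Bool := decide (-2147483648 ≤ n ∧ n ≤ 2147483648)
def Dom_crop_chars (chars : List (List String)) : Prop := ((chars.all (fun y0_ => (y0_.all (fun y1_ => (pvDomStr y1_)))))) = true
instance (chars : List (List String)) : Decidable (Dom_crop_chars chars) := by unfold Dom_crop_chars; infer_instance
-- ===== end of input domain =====

-- B replaces A's fixpoint trim loops interleaved with zip(*) transpositions by one occupancy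
-- mask per axis plus first/last-True spans and three nested slices (return value only; neither
-- version mutates its argument).

-- ===== PORT A =====

-- `not list(filter(lambda s: s.strip(), g))` : the group g has no string with non-empty strip
def pvGroupEmpty (g : List String) : Bool := (g.filter (fun s => PySem.Str.strip s != "")).isEmpty

-- one iteration of the `while o != chars` body of _drop_empty_head_tail:
-- chars[0] / chars[-1] raise IndexError on empty lists (PySem.List.pyGet? = none there; such
-- inputs are excluded by Pre_ below), chars[1:] = drop 1, chars[:-1] = dropLast.
def pvDropStep (chars : List (List String)) : List (List String) :=
  let c1 := if pvGroupEmpty ((PySem.List.pyGet? chars 0).getD []) then chars.drop 1 else chars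
  if pvGroupEmpty ((PySem.List.pyGet? c1 (-1)).getD []) then c1.dropLast else c1

theorem pvDropStep_length_lt (chars : List (List String)) (h : pvDropStep chars ≠ chars) :
    (pvDropStep chars).length < chars.length := by
  unfold pvDropStep at *
  rcases chars with _ | ⟨a, l⟩
  · simp [PySem.List.pyGet?, PySem.List.pyIdx?] at h
  · dsimp only at *
    split at h <;> split at h <;>
      simp_all [List.length_dropLast]

-- the `while o != chars` loop: iterate the step until it no longer changes the list
def pvDropEHT (chars : List (List String)) : List (List String) :=
  if pvDropStep chars = chars then chars else pvDropEHT (pvDropStep chars)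
termination_by chars.length
decreasing_by exact pvDropStep_length_lt _ (by assumption)

theorem pvSumTails_le {α : Type} (xss : List (List α)) :
    ((xss.map List.tail).map List.length).sum ≤ (xss.map List.length).sum := by
  induction xss with
  | nil => simp
  | cons a l ih =>
    have : a.tail.length ≤ a.length := by cases a <;> simp
    simp only [List.map_cons, List.sum_cons]; omega

theorem pvSumTails_lt {α : Type} (xss : List (List α)) (hne : xss ≠ [])
    (hall : xss.any List.isEmpty = false) :
    ((xss.map List.tail).map List.length).sum < (xss.map List.length).sum := by
  rcases xss with _ | ⟨a, l⟩
  · simp at hne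
  · simp only [List.any_cons, Bool.or_eq_false_iff, List.isEmpty_eq_false_iff] at hall
    have h1 := pvSumTails_le l
    have : a.tail.length < a.length := by
      rcases a with _ | _
      · exact absurd rfl hall.1
      · simp
    simp only [List.map_cons, List.sum_cons]; omega

-- zip(*xss) : truncates at the shortest member; zip() with no arguments is empty
def pvZipStar {α : Type} (xss : List (List α)) : List (List α) :=
  if xss.isEmpty then []
  else if h : xss.any List.isEmpty then []
  else (xss.filterMap List.head?) :: pvZipStar (xss.map List.tail)
termination_by (xss.map List.length).sum
decreasing_by
  exact pvSumTails_lt _ (by simpa [List.isEmpty_iff] using ‹¬xss.isEmpty = true›)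
    (by simp_all; intro x hx he; subst he; exact h hx)

-- line.ljust(w) : pad on the right with spaces to width w (no-op if already that long)
def pvLjust (s : String) (w : Nat) : String :=
  String.ofList (s.toList ++ List.replicate (w - s.toList.length) ' ')

-- max(...) over a non-empty generator of non-negative lengths; Python raises ValueError on an
-- empty generator (excluded by Pre_ below, where the 0 default is never reached)
def pvMaxLen (l : List Nat) : Nat := l.foldl max 0

def crop_chars (chars : List (List String)) : List (List String) :=
  let tallest := pvMaxLen (chars.map List.length)
  let longest := pvMaxLen ((chars.map (fun layer => layer.map (fun row => row.toList.length))).flatten)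
  let p1 := chars.map (fun layer => layer ++ List.replicate (tallest - layer.length) "")
  let p2 := p1.map (fun layer => layer.map (fun line => pvLjust line longest))
  let c := pvDropEHT p2
  let x1 := pvDropEHT (pvZipStar c)
  let x2 := (pvZipStar x1).map (fun layer => (pvZipStar (layer.map String.toList)).map (fun s => String.ofList s))
  let x3 := pvDropEHT (pvZipStar x2)
  (pvZipStar x3).map (fun cols => (pvZipStar (cols.map String.toList)).map (fun s => String.ofList s))

-- ===== PORT B =====

-- _span(flags): first and last index of True; flags.index(True) raises ValueError when True is
-- absent (excluded by Pre_ below, where the 0 default is never reached); flags[::-1] = reverse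
def pvSpan (flags : List Bool) : Nat × Nat :=
  ((PySem.List.index? flags true).getD 0,
   flags.length - 1 - (PySem.List.index? flags.reverse true).getD 0)

def crop_chars_alt (chars : List (List String)) : List (List String) :=
  let H := pvMaxLen (chars.map List.length)
  let W := pvMaxLen ((chars.map (fun layer => layer.map (fun row => row.toList.length))).flatten)
  let grid := chars.map (fun layer =>
    layer.map (fun row => pvLjust row W) ++ List.replicate (H - layer.length) (String.ofList (List.replicate W ' ')))
  let zmask := grid.map (fun layer => layer.any (fun row => row.toList.any (fun c => !PySem.Chars.isspace c)))
  -- layer[y][x] never goes out of range on the rectangular grid, so getD defaults are unreached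
  let ymask := (List.range H).map (fun y => grid.any (fun layer =>
      (List.range W).any (fun x => !PySem.Chars.isspace (((layer.getD y "").toList).getD x ' '))))
  let xmask := (List.range W).map (fun x => grid.any (fun layer =>
      (List.range H).any (fun y => !PySem.Chars.isspace (((layer.getD y "").toList).getD x ' '))))
  let z := pvSpan zmask
  let y := pvSpan ymask
  let x := pvSpan xmask
  ((grid.drop z.1).take (z.2 + 1 - z.1)).map (fun layer =>
    ((layer.drop y.1).take (y.2 + 1 - y.1)).map (fun row =>
      String.ofList ((row.toList.drop x.1).take (x.2 + 1 - x.1))))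

-- ===== PRECONDITION & SPEC =====

-- Pre_ excludes exactly the inputs on which A raises (ValueError from max() when chars has no
-- layer or no row at all, IndexError in _drop_empty_head_tail when every character is
-- whitespace): some character somewhere must be non-whitespace.
def Pre_crop_chars (chars : List (List String)) : Prop :=
  chars.any (fun layer => layer.any (fun row => row.toList.any (fun c => !PySem.Chars.isspace c))) = true
instance (chars : List (List String)) : Decidable (Pre_crop_chars chars) := by
  unfold Pre_crop_chars; infer_instance

def pvWitness_crop_chars : List (List String) := [["x"]]

def Spec_crop_chars (chars : List (List String)) (out : List (List String)) : Prop := out = crop_chars_alt chars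
instance (chars : List (List String)) (out : List (List String)) : Decidable (Spec_crop_chars chars out) := by unfold Spec_crop_chars; infer_instance

-- ===== CLAIM (what is proved, stated in full; the proofs are below) =====
def Claim_equal_crop_chars : Prop := ∀ (chars : List (List String)), Dom_crop_chars chars → Pre_crop_chars chars → Spec_crop_chars chars (crop_chars chars)

-- ===== LEMMAS AND PROOFS =====

def pvInk (c : Char) : Bool := !PySem.Chars.isspace c
def pvInkStr (s : String) : Bool := s.toList.any pvInk
def pvInkLayer (g : List String) : Bool := g.any pvInkStr
def pvQ (g : List String) : Bool := !pvInkLayer g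

theorem pvStrip_eq_nil_iff (cs : List Char) :
    PySem.Chars.strip cs = [] ↔ ∀ c ∈ cs, PySem.Chars.isspace c = true := by
  unfold PySem.Chars.strip PySem.Chars.rstrip PySem.Chars.lstrip
  constructor
  · intro h c hc
    rw [List.reverse_eq_nil_iff, List.dropWhile_eq_nil_iff] at h
    have hc' : c ∈ List.takeWhile PySem.Chars.isspace cs ++ List.dropWhile PySem.Chars.isspace cs := by
      rw [List.takeWhile_append_dropWhile]; exact hc
    rcases List.mem_append.1 hc' with h1 | h2
    · exact List.mem_takeWhile_imp h1
    · exact h c (List.mem_reverse.2 h2)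
  · intro h
    have h1 : List.dropWhile PySem.Chars.isspace cs = [] := by
      rw [List.dropWhile_eq_nil_iff]; exact h
    simp [h1]

theorem pvStripNe (s : String) : (PySem.Str.strip s != "") = pvInkStr s := by
  have hkey : (PySem.Str.strip s = "") ↔ (PySem.Chars.strip s.toList = []) := by
    rw [← PySem.Str.toList_strip, String.toList_eq_nil_iff]
  by_cases hi : pvInkStr s = true
  · rw [hi]
    simp only [bne_iff_ne, ne_eq]
    intro hcon
    rw [hkey, pvStrip_eq_nil_iff] at hcon
    simp only [pvInkStr, List.any_eq_true, pvInk] at hi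
    obtain ⟨c, hc, hic⟩ := hi
    simp [hcon c hc] at hic
  · simp only [Bool.not_eq_true] at hi
    rw [hi]
    simp only [bne_eq_false_iff_eq]
    rw [hkey, pvStrip_eq_nil_iff]
    intro c hc
    simp only [pvInkStr, List.any_eq_false, pvInk] at hi
    simpa using hi c hc

theorem pvGroupEmpty_eq (g : List String) : pvGroupEmpty g = pvQ g := by
  unfold pvGroupEmpty pvQ pvInkLayer
  by_cases h : g.any pvInkStr = true
  · obtain ⟨s, hs, hinks⟩ := List.any_eq_true.1 h
    rw [h, Bool.not_true, List.isEmpty_eq_false_iff]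
    intro hnil
    rw [List.filter_eq_nil_iff] at hnil
    have := hnil s hs
    rw [pvStripNe] at this
    simp [hinks] at this
  · simp only [Bool.not_eq_true] at h
    rw [h, Bool.not_false, List.isEmpty_iff, List.filter_eq_nil_iff]
    intro s hs
    rw [pvStripNe]
    simpa using List.any_eq_false.1 h s hs

theorem pvDropWhile_append_of_ink (ys : List (List String)) (zs : List (List String))
    (h : ys.any pvInkLayer = true) :
    List.dropWhile pvQ (ys ++ zs) = List.dropWhile pvQ ys ++ zs := by
  have hne : List.dropWhile pvQ ys ≠ [] := by
    rw [ne_eq, List.dropWhile_eq_nil_iff]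
    obtain ⟨s, hs, hink⟩ := List.any_eq_true.1 h
    intro hall
    have := hall s hs
    simp [pvQ, hink] at this
  rw [List.dropWhile_append]
  simp [List.isEmpty_eq_false_iff.2 hne]

theorem pvDropEHT_trim : ∀ (n : Nat) (l : List (List String)), l.length ≤ n →
    l.any pvInkLayer = true →
    pvDropEHT l = (l.dropWhile pvQ).rdropWhile pvQ := by
  intro n
  induction n with
  | zero =>
    intro l hl h
    rw [List.length_eq_zero_iff.1 (Nat.le_zero.1 hl)] at h
    simp at h
  | succ n ih =>
    intro l hl h
    rcases hlc : l with _ | ⟨a, t⟩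
    · simp [hlc] at h
    subst hlc
    by_cases hqa : pvQ a = true
    · -- head layer is blank: c1 = t
      have hinka : pvInkLayer a = false := by
        by_contra hc
        simp only [Bool.not_eq_false] at hc
        simp [pvQ, hc] at hqa
      have hint : t.any pvInkLayer = true := by
        simp only [List.any_cons, hinka, Bool.false_or] at h
        exact h
      have htne : t ≠ [] := by rintro rfl; simp at hint
      obtain ⟨ys, b, hysb⟩ := (List.eq_nil_or_concat t).resolve_left htne
      rw [List.concat_eq_append] at hysb
      have hstep0 : pvDropStep (a :: t) =
          (if pvGroupEmpty ((PySem.List.pyGet? t (-1)).getD []) then t.dropLast else t) := by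
        unfold pvDropStep
        simp only [PySem.List.pyGet?_zero_cons, Option.getD_some, pvGroupEmpty_eq, hqa,
          if_true, List.drop_one, List.tail_cons]
      by_cases hqb : pvQ b = true
      · -- last layer blank too: step drops both
        have hstep : pvDropStep (a :: t) = ys := by
          rw [hstep0, hysb]
          simp [PySem.List.pyGet?_neg_one, List.getLast?_concat, pvGroupEmpty_eq, hqb]
        have hinkys : ys.any pvInkLayer = true := by
          rw [hysb, List.any_append] at hint
          have hb : pvInkLayer b = false := by
            by_contra hc
            simp only [Bool.not_eq_false] at hc
            simp [pvQ, hc] at hqb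
          simpa [hb] using hint
        have hne : pvDropStep (a :: t) ≠ a :: t := by
          rw [hstep]
          intro hcon
          have := congrArg List.length hcon
          rw [hysb] at this
          simp at this
          omega
        rw [pvDropEHT.eq_def, if_neg hne, hstep]
        rw [ih ys (by have := congrArg List.length hysb; simp at this hl ⊢; omega) hinkys]
        rw [hysb, ← List.cons_append, pvDropWhile_append_of_ink _ _ (by simp [hinka, hinkys]),
          List.rdropWhile_concat_pos _ _ _ hqb]
        rw [List.dropWhile_cons, if_pos hqa]
      · -- only the head is dropped
        have hstep : pvDropStep (a :: t) = t := by
          rw [hstep0, hysb]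
          simp [PySem.List.pyGet?_neg_one, List.getLast?_concat, pvGroupEmpty_eq, hqb]
        have hne : pvDropStep (a :: t) ≠ a :: t := by
          rw [hstep]
          intro hcon
          have := congrArg List.length hcon
          simp at this
        rw [pvDropEHT.eq_def, if_neg hne, hstep]
        rw [ih t (by simp at hl ⊢; omega) hint]
        rw [List.dropWhile_cons, if_pos hqa]
    · -- head layer has ink: c1 = a :: t
      simp only [Bool.not_eq_true] at hqa
      obtain ⟨ys, b, hysb⟩ := (List.eq_nil_or_concat (a :: t)).resolve_left (by simp)
      rw [List.concat_eq_append] at hysb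
      have hstep0 : pvDropStep (a :: t) =
          (if pvGroupEmpty ((PySem.List.pyGet? (a :: t) (-1)).getD []) then (a :: t).dropLast
           else a :: t) := by
        unfold pvDropStep
        simp only [PySem.List.pyGet?_zero_cons, Option.getD_some, pvGroupEmpty_eq, hqa,
          Bool.false_eq_true, if_false]
      by_cases hqb : pvQ b = true
      · -- drop the last layer, keep the head
        have hstep : pvDropStep (a :: t) = ys := by
          rw [hstep0, hysb]
          simp [PySem.List.pyGet?_neg_one, List.getLast?_concat, pvGroupEmpty_eq, hqb]
        have hysne : ys ≠ [] := by
          rintro rfl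
          simp only [List.nil_append] at hysb
          have : a = b := by
            have := hysb
            injection this with h1 h2
          rw [← this] at hqb
          rw [hqb] at hqa
          simp at hqa
        obtain ⟨a', ys', hys'⟩ := List.exists_cons_of_ne_nil hysne
        have haa : a' = a := by
          rw [hys'] at hysb
          injection hysb with h1 h2
          exact h1.symm
        have hinkys : ys.any pvInkLayer = true := by
          rw [hys', haa, List.any_cons]
          have : pvInkLayer a = true := by
            by_contra hc
            simp only [Bool.not_eq_true] at hc
            simp [pvQ, hc] at hqa
          simp [this]
        have hne : pvDropStep (a :: t) ≠ a :: t := by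
          rw [hstep]
          intro hcon
          have := congrArg List.length hcon
          rw [hysb] at this
          simp at this
        rw [pvDropEHT.eq_def, if_neg hne, hstep]
        rw [ih ys (by have := congrArg List.length hysb; simp at this hl ⊢; omega) hinkys]
        rw [hysb, pvDropWhile_append_of_ink _ _ hinkys,
          List.rdropWhile_concat_pos _ _ _ hqb]
      · -- nothing changes: fixpoint reached
        have hstep : pvDropStep (a :: t) = a :: t := by
          rw [hstep0, hysb]
          simp [PySem.List.pyGet?_neg_one, List.getLast?_concat, pvGroupEmpty_eq, hqb]
        rw [pvDropEHT.eq_def, if_pos hstep]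
        rw [List.dropWhile_cons, if_neg (by simp [hqa]), hysb,
          List.rdropWhile_concat_neg _ _ _ (by simp [hqb])]

theorem pvFindIdx_congr {α : Type} (p q : α → Bool) :
    ∀ l : List α, (∀ x ∈ l, p x = q x) → l.findIdx p = l.findIdx q := by
  intro l
  induction l with
  | nil => intro _; rfl
  | cons a t ih =>
    intro h
    rw [List.findIdx_cons, List.findIdx_cons, h a (by simp), ih (fun x hx => h x (by simp [hx]))]

theorem pvDropWhile_eq_drop {α : Type} (p : α → Bool) :
    ∀ l : List α, l.dropWhile (fun x => !p x) = l.drop (l.findIdx p) := by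
  intro l
  induction l with
  | nil => rfl
  | cons a t ih =>
    rw [List.dropWhile_cons, List.findIdx_cons]
    by_cases hp : p a = true
    · simp [hp]
    · simp only [Bool.not_eq_true] at hp
      simp [hp, ih]

theorem pvFindIdx_add_rev_le {α : Type} (p : α → Bool) (l : List α) (h : l.any p = true) :
    l.findIdx p + l.reverse.findIdx p + 1 ≤ l.length := by
  have hex : ∃ x ∈ l, p x = true := by simpa using h
  have hi : l.findIdx p < l.length := List.findIdx_lt_length_of_exists hex
  have hk : l.reverse.findIdx p < l.length := by
    have := List.findIdx_lt_length_of_exists (p := p) (xs := l.reverse) (by simpa using hex)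
    simpa using this
  by_contra hcon
  push_neg at hcon
  -- the element at position length - 1 - k has p, but lies strictly before findIdx p l
  have hklt : l.reverse.findIdx p < l.reverse.length := by simpa using hk
  have hrev := List.findIdx_getElem (w := hklt)
  rw [List.getElem_reverse] at hrev
  have hlt : l.length - 1 - l.reverse.findIdx p < l.findIdx p := by
    omega
  have hfalse := List.not_of_lt_findIdx hlt
  exact absurd (hfalse.symm.trans hrev) Bool.false_ne_true

theorem pvTrim_eq_slice {α : Type} (p : α → Bool) (l : List α) (h : l.any p = true) :
    (l.dropWhile (fun x => !p x)).rdropWhile (fun x => !p x)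
      = (l.drop (l.findIdx p)).take (l.length - l.reverse.findIdx p - l.findIdx p) := by
  have hik := pvFindIdx_add_rev_le p l h
  have hex : ∃ x ∈ l, p x = true := by simpa using h
  have hi : l.findIdx p < l.length := List.findIdx_lt_length_of_exists hex
  rw [pvDropWhile_eq_drop]
  rw [List.rdropWhile, pvDropWhile_eq_drop]
  rw [List.reverse_drop]
  rw [List.reverse_reverse, List.length_reverse, List.length_drop]
  rw [List.reverse_drop]
  rw [List.findIdx_take]
  have hmin : min (l.length - l.findIdx p) (l.reverse.findIdx p) = l.reverse.findIdx p := by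
    omega
  rw [hmin]
  congr 1
  omega

theorem pvIndex?_map {α : Type} (p : α → Bool) :
    ∀ l : List α, l.any p = true → PySem.List.index? (l.map p) true = some (l.findIdx p) := by
  intro l
  induction l with
  | nil => intro h; simp at h
  | cons a t ih =>
    intro h
    rw [List.map_cons, List.findIdx_cons]
    by_cases hp : p a = true
    · rw [hp, PySem.List.index?_cons_self]
      simp
    · simp only [Bool.not_eq_true] at hp
      rw [hp, PySem.List.index?_cons_of_ne _ (by simp)]
      have ht : t.any p = true := by simpa [hp] using h
      rw [ih ht]
      simp [hp]

theorem pvGetD_range_map {α : Type} (f : Nat → α) (n k : Nat) (d : α) (hk : k < n) :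
    ((List.range n).map f).getD k d = f k := by
  rw [List.getD_eq_getElem?_getD]
  simp [List.getElem?_map, List.getElem?_range, hk]

theorem pvSlice_as_range {α : Type} (l : List α) (a b : Nat) (d : α) (h : a + b ≤ l.length) :
    (l.drop a).take b = (List.range b).map (fun i => l.getD (a + i) d) := by
  apply List.ext_getElem
  · simp; omega
  · intro i hi1 hi2
    have hib : i < b := by simp at hi2; omega
    have hail : a + i < l.length := by omega
    simp only [List.getElem_take, List.getElem_drop, List.getElem_map, List.getElem_range]
    rw [List.getD_eq_getElem (hn := hail)]

theorem pvAny_eq_range {α : Type} (l : List α) (d : α) (f : α → Bool) :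
    l.any f = (List.range l.length).any (fun i => f (l.getD i d)) := by
  by_cases h : l.any f = true
  · obtain ⟨x, hx, hfx⟩ := List.any_eq_true.1 h
    obtain ⟨i, hi, hgi⟩ := List.mem_iff_getElem.1 hx
    rw [h]
    symm
    rw [List.any_eq_true]
    exact ⟨i, by simpa using hi, by rw [List.getD_eq_getElem (hn := hi), hgi]; exact hfx⟩
  · simp only [Bool.not_eq_true] at h
    rw [h]
    symm
    rw [List.any_eq_false]
    intro i hi
    rw [List.mem_range] at hi
    rw [List.getD_eq_getElem (hn := hi)]
    exact List.any_eq_false.1 h _ (List.getElem_mem hi)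

theorem pvAny_range_restrict (n a b : Nat) (f : Nat → Bool) (hab : a + b ≤ n)
    (hlow : ∀ i, i < a → f i = false) (hhigh : ∀ i, a + b ≤ i → i < n → f i = false) :
    (List.range n).any f = (List.range b).any (fun i => f (a + i)) := by
  by_cases h : (List.range b).any (fun i => f (a + i)) = true
  · obtain ⟨i, hi, hfi⟩ := List.any_eq_true.1 h
    rw [List.mem_range] at hi
    rw [h, List.any_eq_true]
    exact ⟨a + i, List.mem_range.2 (by omega), hfi⟩
  · simp only [Bool.not_eq_true] at h
    rw [h, List.any_eq_false]
    intro i hi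
    rw [List.mem_range] at hi
    by_cases h1 : i < a
    · simp [hlow i h1]
    · by_cases h2 : a + b ≤ i
      · simp [hhigh i h2 hi]
      · have := List.any_eq_false.1 h (i - a) (List.mem_range.2 (by omega))
        simp only [Nat.add_sub_cancel' (by omega : a ≤ i)] at this
        simp [this]

theorem pvFilterMap_head? {α : Type} (d : α) :
    ∀ xss : List (List α), (∀ r ∈ xss, r ≠ []) →
      xss.filterMap List.head? = xss.map (fun r => r.getD 0 d) := by
  intro xss
  induction xss with
  | nil => intro _; rfl
  | cons r t ih =>
    intro h
    rcases r with _ | ⟨x, xs⟩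
    · exact absurd rfl (h [] (by simp))
    · simp only [List.filterMap_cons, List.head?_cons, List.map_cons, List.getD_cons_zero]
      rw [ih (fun r hr => h r (by simp [hr]))]

theorem pvGetD_tail {α : Type} (r : List α) (c : Nat) (d : α) :
    r.tail.getD c d = r.getD (c + 1) d := by
  cases r <;> simp

theorem pvZipStar_eq {α : Type} (d : α) :
    ∀ (w : Nat) (xss : List (List α)), xss ≠ [] → (∀ r ∈ xss, r.length = w) →
      pvZipStar xss = (List.range w).map (fun c => xss.map (fun row => row.getD c d)) := by
  intro w
  induction w with
  | zero =>
    intro xss hne hrect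
    rw [pvZipStar.eq_def]
    have hh : xss.isEmpty = false := List.isEmpty_eq_false_iff.2 hne
    rw [hh]
    have hany : xss.any List.isEmpty = true := by
      obtain ⟨r, hr⟩ := List.exists_mem_of_ne_nil xss hne
      exact List.any_eq_true.2 ⟨r, hr, by simp [List.isEmpty_iff, List.length_eq_zero_iff.1 (hrect r hr)]⟩
    simp [hany]
  | succ v ih =>
    intro xss hne hrect
    have hnonempty : ∀ r ∈ xss, r ≠ [] := by
      intro r hr hcon
      have := hrect r hr
      rw [hcon] at this
      simp at this
    rw [pvZipStar.eq_def]
    have hh : xss.isEmpty = false := List.isEmpty_eq_false_iff.2 hne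
    rw [hh]
    have hany : xss.any List.isEmpty = false := by
      rw [List.any_eq_false]
      intro r hr
      simp [List.isEmpty_eq_false_iff.2 (hnonempty r hr)]
    simp only [hany, Bool.false_eq_true, if_false, dif_neg, Bool.false_eq_true, not_false_iff]
    rw [pvFilterMap_head? d _ hnonempty]
    rw [ih (xss.map List.tail) (by simp [hne])
      (by intro r hr
          obtain ⟨r0, hr0, hre⟩ := List.mem_map.1 hr
          have := hrect r0 hr0
          rw [← hre]
          simp [this])]
    rw [List.range_succ_eq_map]
    rw [List.map_cons]
    congr 1
    rw [List.map_map]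
    apply List.map_congr_left
    intro c _
    rw [List.map_map]
    apply List.map_congr_left
    intro r _
    simp only [Function.comp_apply]
    rw [pvGetD_tail]

theorem pvInit_le_foldl_max : ∀ (l : List Nat) (a : Nat), a ≤ l.foldl max a := by
  intro l
  induction l with
  | nil => intro a; simp
  | cons b t ih =>
    intro a
    calc a ≤ max a b := le_max_left a b
    _ ≤ t.foldl max (max a b) := ih (max a b)

theorem pvLe_foldl_max : ∀ (l : List Nat) (a x : Nat), x ∈ l → x ≤ l.foldl max a := by
  intro l
  induction l with
  | nil => intro a x hx; simp at hx
  | cons b t ih =>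
    intro a x hx
    rcases List.mem_cons.1 hx with rfl | hx'
    · calc x ≤ max a x := le_max_right a x
      _ ≤ t.foldl max (max a x) := pvInit_le_foldl_max t (max a x)
    · exact ih (max a b) x hx'

def pvG2 (grid : List (List String)) (z y : Nat) : String := (grid.getD z []).getD y ""
def pvG3 (grid : List (List String)) (z y x : Nat) : Char := (pvG2 grid z y).toList.getD x ' '

theorem pvInkStr_ljust (s : String) (w : Nat) : pvInkStr (pvLjust s w) = pvInkStr s := by
  unfold pvLjust pvInkStr
  rw [String.toList_ofList, List.any_append]
  have : (List.replicate (w - s.toList.length) ' ').any pvInk = false := by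
    rw [List.any_eq_false]
    intro c hc
    rw [List.eq_of_mem_replicate hc]
    decide
  rw [this, Bool.or_false]

theorem pvPad_eq (chars : List (List String)) (H W : Nat) :
    (chars.map (fun layer => layer ++ List.replicate (H - layer.length) "")).map
        (fun layer => layer.map (fun line => pvLjust line W))
      = chars.map (fun layer =>
          layer.map (fun row => pvLjust row W) ++
            List.replicate (H - layer.length) (String.ofList (List.replicate W ' '))) := by
  rw [List.map_map]
  apply List.map_congr_left
  intro layer _
  simp only [Function.comp_apply, List.map_append, List.map_replicate]
  have : pvLjust "" W = String.ofList (List.replicate W ' ') := by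
    unfold pvLjust
    simp
  rw [this]

theorem pvSpan_map {α : Type} (p : α → Bool) (l : List α) (h : l.any p = true) :
    pvSpan (l.map p) = (l.findIdx p, l.length - 1 - l.reverse.findIdx p) := by
  unfold pvSpan
  rw [pvIndex?_map p l h]
  rw [← List.map_reverse, pvIndex?_map p l.reverse (by rw [List.any_reverse]; exact h)]
  simp

theorem pvDropEHT_slice (l : List (List String)) (h : l.any pvInkLayer = true) :
    pvDropEHT l = (l.drop (l.findIdx pvInkLayer)).take
      (l.length - l.reverse.findIdx pvInkLayer - l.findIdx pvInkLayer) := by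
  rw [pvDropEHT_trim l.length l le_rfl h]
  have hq : pvQ = (fun x => !pvInkLayer x) := rfl
  rw [hq]
  exact pvTrim_eq_slice pvInkLayer l h

theorem pvLayerNoInk (layer : List String) (h : pvInkLayer layer = false) (y : Nat) :
    pvInkStr (layer.getD y "") = false := by
  by_cases hy : y < layer.length
  · rw [List.getD_eq_getElem (hn := hy)]
    exact (Bool.not_eq_true _) ▸ (List.any_eq_false.1 h _ (List.getElem_mem hy))
  · rw [List.getD_eq_getElem?_getD, List.getElem?_eq_none (by omega)]
    rfl

theorem pvStrNoInk (s : String) (h : pvInkStr s = false) (x : Nat) :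
    pvInk (s.toList.getD x ' ') = false := by
  by_cases hx : x < s.toList.length
  · rw [List.getD_eq_getElem (hn := hx)]
    exact (Bool.not_eq_true _) ▸ (List.any_eq_false.1 h _ (List.getElem_mem hx))
  · rw [List.getD_eq_getElem?_getD, List.getElem?_eq_none (by omega)]
    decide

theorem pvInkLayer_map_any {α : Type} (f : α → String) (l : List α) :
    pvInkLayer (l.map f) = l.any (fun x => pvInkStr (f x)) := by
  unfold pvInkLayer
  rw [List.any_map]
  rfl

theorem pvInkStr_ofList (cs : List Char) : pvInkStr (String.ofList cs) = cs.any pvInk := by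
  unfold pvInkStr
  rw [String.toList_ofList]

def pvZ0 (grid : List (List String)) : Nat := grid.findIdx pvInkLayer
def pvKz (grid : List (List String)) : Nat := grid.reverse.findIdx pvInkLayer
def pvDz (grid : List (List String)) : Nat := grid.length - pvKz grid - pvZ0 grid
def pvUrow (grid : List (List String)) (y : Nat) : List String :=
  (List.range (pvDz grid)).map (fun i => (grid.getD (pvZ0 grid + i) []).getD y "")
def pvU (grid : List (List String)) (H : Nat) : List (List String) :=
  (List.range H).map (pvUrow grid)
def pvY0 (grid : List (List String)) (H : Nat) : Nat := (pvU grid H).findIdx pvInkLayer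
def pvKy (grid : List (List String)) (H : Nat) : Nat := (pvU grid H).reverse.findIdx pvInkLayer
def pvHy (grid : List (List String)) (H : Nat) : Nat := H - pvKy grid H - pvY0 grid H
def pvCol (grid : List (List String)) (H : Nat) (x : Nat) : List String :=
  (List.range (pvDz grid)).map (fun i =>
    String.ofList ((List.range (pvHy grid H)).map (fun j =>
      pvG3 grid (pvZ0 grid + i) (pvY0 grid H + j) x)))
def pvT3 (grid : List (List String)) (H W : Nat) : List (List String) :=
  (List.range W).map (pvCol grid H)
def pvX0 (grid : List (List String)) (H W : Nat) : Nat := (pvT3 grid H W).findIdx pvInkLayer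
def pvKx (grid : List (List String)) (H W : Nat) : Nat := (pvT3 grid H W).reverse.findIdx pvInkLayer
def pvWx (grid : List (List String)) (H W : Nat) : Nat := W - pvKx grid H W - pvX0 grid H W
def pvCanon (grid : List (List String)) (H W : Nat) : List (List String) :=
  (List.range (pvDz grid)).map (fun i => (List.range (pvHy grid H)).map (fun j =>
    String.ofList ((List.range (pvWx grid H W)).map (fun m =>
      pvG3 grid (pvZ0 grid + i) (pvY0 grid H + j) (pvX0 grid H W + m)))))

theorem pvAny_congr {α : Type} (p q : α → Bool) :
    ∀ l : List α, (∀ x ∈ l, p x = q x) → l.any p = l.any q := by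
  intro l
  induction l with
  | nil => intro _; rfl
  | cons a t ih =>
    intro h
    rw [List.any_cons, List.any_cons, h a (by simp), ih (fun x hx => h x (by simp [hx]))]

theorem pvZout (grid : List (List String)) (hink : grid.any pvInkLayer = true) :
    ∀ z, z < grid.length → (z < pvZ0 grid ∨ grid.length - pvKz grid ≤ z) →
      pvInkLayer (grid.getD z []) = false := by
  intro z hz hcase
  rw [List.getD_eq_getElem (hn := hz)]
  rcases hcase with h1 | h2
  · exact List.not_of_lt_findIdx h1
  · have hrevle := pvFindIdx_add_rev_le pvInkLayer grid hink
    have hk : grid.length - 1 - z < pvKz grid := by unfold pvKz at h2 ⊢; omega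
    have h3 := List.not_of_lt_findIdx (xs := grid.reverse) (i := grid.length - 1 - z)
      (by unfold pvKz at hk; exact hk)
    rw [List.getElem_reverse] at h3
    have hidx : grid.length - 1 - (grid.length - 1 - z) = z := by omega
    simp only [hidx] at h3
    exact h3

theorem pvInkLayer_exists (layer : List String) (h : pvInkLayer layer = true) :
    ∃ y, ∃ hy : y < layer.length, pvInkStr layer[y] = true := by
  obtain ⟨row, hr, hri⟩ := List.any_eq_true.1 h
  obtain ⟨y, hy, hget⟩ := List.mem_iff_getElem.1 hr
  exact ⟨y, hy, by rw [hget]; exact hri⟩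

theorem pvInkStr_exists (s : String) (h : pvInkStr s = true) :
    ∃ x, ∃ hx : x < s.toList.length, pvInk s.toList[x] = true := by
  obtain ⟨c, hc, hci⟩ := List.any_eq_true.1 h
  obtain ⟨x, hx, hget⟩ := List.mem_iff_getElem.1 hc
  exact ⟨x, hx, by rw [hget]; exact hci⟩

theorem pvDz_pos (grid : List (List String)) (hink : grid.any pvInkLayer = true) :
    1 ≤ pvDz grid ∧ pvZ0 grid + pvDz grid = grid.length - pvKz grid ∧
      pvZ0 grid + pvDz grid ≤ grid.length ∧ pvKz grid ≤ grid.length - 1 := by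
  have := pvFindIdx_add_rev_le pvInkLayer grid hink
  unfold pvDz pvZ0 pvKz at *
  omega

theorem pvUink (grid : List (List String)) (H W : Nat)
    (hlay : ∀ layer ∈ grid, layer.length = H)
    (hink : grid.any pvInkLayer = true) :
    (pvU grid H).any pvInkLayer = true := by
  obtain ⟨hDz1, -, hDzle, -⟩ := pvDz_pos grid hink
  have hz0lt : pvZ0 grid < grid.length :=
    List.findIdx_lt_length_of_exists (by simpa using hink)
  have hz0ink : pvInkLayer grid[pvZ0 grid] = true := List.findIdx_getElem (w := hz0lt)
  obtain ⟨y1, hy1, hrowink⟩ := pvInkLayer_exists _ hz0ink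
  have hH : grid[pvZ0 grid].length = H := hlay _ (List.getElem_mem hz0lt)
  rw [List.any_eq_true]
  refine ⟨pvUrow grid y1, List.mem_map_of_mem (List.mem_range.2 (by omega)), ?_⟩
  unfold pvInkLayer
  rw [List.any_eq_true]
  refine ⟨(grid.getD (pvZ0 grid + 0) []).getD y1 "", ?_, ?_⟩
  · unfold pvUrow
    exact List.mem_map_of_mem (List.mem_range.2 (by omega))
  · rw [Nat.add_zero, List.getD_eq_getElem (hn := hz0lt), List.getD_eq_getElem (hn := hy1)]
    exact hrowink

theorem pvHy_pos (grid : List (List String)) (H W : Nat)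
    (hlay : ∀ layer ∈ grid, layer.length = H)
    (hink : grid.any pvInkLayer = true) :
    1 ≤ pvHy grid H ∧ pvY0 grid H + pvHy grid H ≤ H ∧ pvKy grid H ≤ H - 1 := by
  have := pvFindIdx_add_rev_le pvInkLayer (pvU grid H) (pvUink grid H W hlay hink)
  have hlen : (pvU grid H).length = H := by unfold pvU; simp
  unfold pvHy pvY0 pvKy at *
  rw [hlen] at this
  omega

theorem pvYout (grid : List (List String)) (H W : Nat)
    (hlay : ∀ layer ∈ grid, layer.length = H)
    (hink : grid.any pvInkLayer = true) :
    ∀ y, y < H → (y < pvY0 grid H ∨ pvY0 grid H + pvHy grid H ≤ y) →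
      pvInkLayer (pvUrow grid y) = false := by
  intro y hy hcase
  have hlen : (pvU grid H).length = H := by unfold pvU; simp
  rcases hcase with h1 | h2
  · have := List.not_of_lt_findIdx (xs := pvU grid H) (i := y) (by exact h1)
    simp only [pvU, List.getElem_map, List.getElem_range] at this
    exact this
  · have hky := pvHy_pos grid H W hlay hink
    have hk : H - 1 - y < pvKy grid H := by unfold pvHy at h2; omega
    have h3 := List.not_of_lt_findIdx (xs := (pvU grid H).reverse) (i := H - 1 - y)
      (by unfold pvKy at hk; exact hk)
    rw [List.getElem_reverse] at h3
    have hidx : (pvU grid H).length - 1 - (H - 1 - y) = y := by omega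
    simp only [hidx] at h3
    simp only [pvU, List.getElem_map, List.getElem_range] at h3
    exact h3

theorem pvBridgeY (grid : List (List String)) (H W : Nat)
    (hlay : ∀ layer ∈ grid, layer.length = H)
    (hrow : ∀ layer ∈ grid, ∀ row ∈ layer, row.toList.length = W)
    (hink : grid.any pvInkLayer = true) (y : Nat) (hy : y < H) :
    pvInkLayer (pvUrow grid y) =
      grid.any (fun layer => (List.range W).any (fun x =>
        !PySem.Chars.isspace ((layer.getD y "").toList.getD x ' '))) := by
  obtain ⟨hDz1, hDzeq, hDzle, hkzle⟩ := pvDz_pos grid hink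
  have hRHS : grid.any (fun layer => (List.range W).any (fun x =>
      !PySem.Chars.isspace ((layer.getD y "").toList.getD x ' '))) =
      (List.range grid.length).any (fun z => pvInkStr ((grid.getD z []).getD y "")) := by
    rw [pvAny_eq_range grid ([] : List String)]
    apply pvAny_congr
    intro z hz
    rw [List.mem_range] at hz
    have hmem : grid.getD z [] ∈ grid := by
      rw [List.getD_eq_getElem (hn := hz)]
      exact List.getElem_mem hz
    have hrowlen : ((grid.getD z []).getD y "").toList.length = W := by
      apply hrow _ hmem
      have hylen : y < (grid.getD z []).length := by rw [hlay _ hmem]; omega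
      rw [List.getD_eq_getElem (hn := hylen)]
      exact List.getElem_mem hylen
    rw [← hrowlen]
    have hfun : (fun x => !PySem.Chars.isspace (((grid.getD z []).getD y "").toList.getD x ' '))
        = (fun x => pvInk (((grid.getD z []).getD y "").toList.getD x ' ')) := rfl
    rw [hfun, ← pvAny_eq_range (((grid.getD z []).getD y "").toList) ' ' pvInk]
    rfl
  rw [hRHS]
  unfold pvUrow
  rw [pvInkLayer_map_any]
  symm
  exact pvAny_range_restrict grid.length (pvZ0 grid) (pvDz grid)
    (fun z => pvInkStr ((grid.getD z []).getD y "")) (by omega)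
    (fun z hzlt => pvLayerNoInk _ (pvZout grid hink z (by omega) (Or.inl hzlt)) y)
    (fun z hzge hzlt => pvLayerNoInk _ (pvZout grid hink z hzlt (Or.inr (by omega))) y)

theorem pvT3ink (grid : List (List String)) (H W : Nat)
    (hlay : ∀ layer ∈ grid, layer.length = H)
    (hrow : ∀ layer ∈ grid, ∀ row ∈ layer, row.toList.length = W)
    (hink : grid.any pvInkLayer = true) :
    (pvT3 grid H W).any pvInkLayer = true := by
  obtain ⟨hDz1, hDzeq, hDzle, hkzle⟩ := pvDz_pos grid hink
  obtain ⟨hHy1, hHyle, hkyle⟩ := pvHy_pos grid H W hlay hink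
  have hu := pvUink grid H W hlay hink
  have hulen : (pvU grid H).length = H := by unfold pvU; simp
  have hy0lt : pvY0 grid H < (pvU grid H).length :=
    List.findIdx_lt_length_of_exists (by simpa using hu)
  have hy0ink : pvInkLayer (pvU grid H)[pvY0 grid H] = true := List.findIdx_getElem (w := hy0lt)
  simp only [pvU, List.getElem_map, List.getElem_range] at hy0ink
  obtain ⟨s, hs, hsink⟩ := List.any_eq_true.1 hy0ink
  unfold pvUrow at hs
  obtain ⟨i1, hi1r, rfl⟩ := List.mem_map.1 hs
  rw [List.mem_range] at hi1r
  have hz1lt : pvZ0 grid + i1 < grid.length := by omega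
  have hlmem : grid.getD (pvZ0 grid + i1) [] ∈ grid := by
    rw [List.getD_eq_getElem (hn := hz1lt)]
    exact List.getElem_mem hz1lt
  have hy0H : pvY0 grid H < H := by rw [hulen] at hy0lt; exact hy0lt
  have hymem : (grid.getD (pvZ0 grid + i1) []).getD (pvY0 grid H) "" ∈ grid.getD (pvZ0 grid + i1) [] := by
    have : pvY0 grid H < (grid.getD (pvZ0 grid + i1) []).length := by
      rw [hlay _ hlmem]; exact hy0H
    rw [List.getD_eq_getElem (hn := this)]
    exact List.getElem_mem this
  have hWlen : ((grid.getD (pvZ0 grid + i1) []).getD (pvY0 grid H) "").toList.length = W :=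
    hrow _ hlmem _ hymem
  obtain ⟨x1, hx1, hcink⟩ := pvInkStr_exists _ hsink
  have hx1W : x1 < W := by rw [hWlen] at hx1; exact hx1
  rw [List.any_eq_true]
  refine ⟨pvCol grid H x1, ?_, ?_⟩
  · unfold pvT3
    exact List.mem_map_of_mem (List.mem_range.2 hx1W)
  · unfold pvInkLayer pvCol
    rw [List.any_eq_true]
    refine ⟨_, List.mem_map_of_mem (List.mem_range.2 hi1r), ?_⟩
    rw [pvInkStr_ofList, List.any_eq_true]
    refine ⟨pvG3 grid (pvZ0 grid + i1) (pvY0 grid H + 0) x1,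
      List.mem_map_of_mem (List.mem_range.2 (by omega)), ?_⟩
    unfold pvG3 pvG2
    rw [Nat.add_zero]
    rw [List.getD_eq_getElem (hn := by rw [hWlen]; exact hx1W)]
    exact hcink

theorem pvWx_pos (grid : List (List String)) (H W : Nat)
    (hlay : ∀ layer ∈ grid, layer.length = H)
    (hrow : ∀ layer ∈ grid, ∀ row ∈ layer, row.toList.length = W)
    (hink : grid.any pvInkLayer = true) :
    1 ≤ pvWx grid H W ∧ pvX0 grid H W + pvWx grid H W ≤ W ∧ pvKx grid H W ≤ W - 1 := by
  have := pvFindIdx_add_rev_le pvInkLayer (pvT3 grid H W) (pvT3ink grid H W hlay hrow hink)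
  have hlen : (pvT3 grid H W).length = W := by unfold pvT3; simp
  unfold pvWx pvX0 pvKx at *
  rw [hlen] at this
  omega

theorem pvBridgeX (grid : List (List String)) (H W : Nat)
    (hlay : ∀ layer ∈ grid, layer.length = H)
    (hrow : ∀ layer ∈ grid, ∀ row ∈ layer, row.toList.length = W)
    (hink : grid.any pvInkLayer = true) (x : Nat) (hx : x < W) :
    pvInkLayer (pvCol grid H x) =
      grid.any (fun layer => (List.range H).any (fun y =>
        !PySem.Chars.isspace ((layer.getD y "").toList.getD x ' '))) := by
  obtain ⟨hDz1, hDzeq, hDzle, hkzle⟩ := pvDz_pos grid hink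
  obtain ⟨hHy1, hHyle, hkyle⟩ := pvHy_pos grid H W hlay hink
  have hRHS : grid.any (fun layer => (List.range H).any (fun y =>
      !PySem.Chars.isspace ((layer.getD y "").toList.getD x ' '))) =
      (List.range grid.length).any (fun z => (List.range H).any (fun y =>
        pvInk (((grid.getD z []).getD y "").toList.getD x ' '))) := by
    rw [pvAny_eq_range grid ([] : List String)]
    rfl
  rw [hRHS]
  have hLHS : pvInkLayer (pvCol grid H x) =
      (List.range (pvDz grid)).any (fun i => (List.range (pvHy grid H)).any (fun j =>
        pvInk (((grid.getD (pvZ0 grid + i) []).getD (pvY0 grid H + j) "").toList.getD x ' '))) := by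
    unfold pvCol
    rw [pvInkLayer_map_any]
    apply pvAny_congr
    intro i _
    rw [pvInkStr_ofList, List.any_map]
    rfl
  rw [hLHS]
  symm
  rw [pvAny_range_restrict grid.length (pvZ0 grid) (pvDz grid) _ (by omega)
    (fun z hzlt => by
      rw [List.any_eq_false]
      intro y _
      exact fun hcon => Bool.false_ne_true
        ((pvStrNoInk _ (pvLayerNoInk _ (pvZout grid hink z (by omega) (Or.inl hzlt)) y) x).symm.trans hcon))
    (fun z hzge hzlt => by
      rw [List.any_eq_false]
      intro y _
      exact fun hcon => Bool.false_ne_true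
        ((pvStrNoInk _ (pvLayerNoInk _ (pvZout grid hink z hzlt (Or.inr (by omega))) y) x).symm.trans hcon))]
  apply pvAny_congr
  intro i hir
  rw [List.mem_range] at hir
  rw [pvAny_range_restrict H (pvY0 grid H) (pvHy grid H) _ (by omega)
    (fun y hylt => by
      have hurow := pvYout grid H W hlay hink y (by omega) (Or.inl hylt)
      unfold pvUrow at hurow
      have hmem : (grid.getD (pvZ0 grid + i) []).getD y "" ∈
          (List.range (pvDz grid)).map (fun i => (grid.getD (pvZ0 grid + i) []).getD y "") :=
        List.mem_map_of_mem (List.mem_range.2 hir)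
      exact pvStrNoInk _ ((Bool.not_eq_true _) ▸ (List.any_eq_false.1 hurow _ hmem)) x)
    (fun y hyge hylt => by
      have hurow := pvYout grid H W hlay hink y hylt (Or.inr hyge)
      unfold pvUrow at hurow
      have hmem : (grid.getD (pvZ0 grid + i) []).getD y "" ∈
          (List.range (pvDz grid)).map (fun i => (grid.getD (pvZ0 grid + i) []).getD y "") :=
        List.mem_map_of_mem (List.mem_range.2 hir)
      exact pvStrNoInk _ ((Bool.not_eq_true _) ▸ (List.any_eq_false.1 hurow _ hmem)) x)]

theorem pvA_canon (grid : List (List String)) (H W : Nat)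
    (hlay : ∀ layer ∈ grid, layer.length = H)
    (hrow : ∀ layer ∈ grid, ∀ row ∈ layer, row.toList.length = W)
    (hink : grid.any pvInkLayer = true) :
    (pvZipStar (pvDropEHT (pvZipStar ((pvZipStar (pvDropEHT (pvZipStar (pvDropEHT grid)))).map
        (fun layer => (pvZipStar (layer.map String.toList)).map (fun s => String.ofList s)))))).map
      (fun cols => (pvZipStar (cols.map String.toList)).map (fun s => String.ofList s))
    = pvCanon grid H W := by
  obtain ⟨hDz1, hDzeq, hDzle, hkzle⟩ := pvDz_pos grid hink
  obtain ⟨hHy1, hHyle, hkyle⟩ := pvHy_pos grid H W hlay hink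
  obtain ⟨hWx1, hWxle, hkxle⟩ := pvWx_pos grid H W hlay hrow hink
  -- stage 1: drop blank layers front and back
  have hc : pvDropEHT grid = (List.range (pvDz grid)).map (fun i => grid.getD (pvZ0 grid + i) []) := by
    rw [pvDropEHT_slice grid hink]
    have h1 : grid.length - grid.reverse.findIdx pvInkLayer - grid.findIdx pvInkLayer
        = pvDz grid := rfl
    have h2 : grid.findIdx pvInkLayer = pvZ0 grid := rfl
    rw [h1, h2]
    exact pvSlice_as_range grid (pvZ0 grid) (pvDz grid) [] (by omega)
  -- stage 2: transpose to row-major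
  have hu : pvZipStar (pvDropEHT grid) = pvU grid H := by
    rw [hc, pvZipStar_eq ("" : String) H _ (by simp; omega)
      (by intro r hr
          obtain ⟨i, hi, rfl⟩ := List.mem_map.1 hr
          rw [List.mem_range] at hi
          apply hlay
          rw [List.getD_eq_getElem (hn := by omega)]
          exact List.getElem_mem _)]
    unfold pvU pvUrow
    simp only [List.map_map]
    rfl
  -- stage 3: drop blank rows top and bottom
  have hx1 : pvDropEHT (pvU grid H) =
      (List.range (pvHy grid H)).map (fun j => pvUrow grid (pvY0 grid H + j)) := by
    rw [pvDropEHT_slice _ (pvUink grid H W hlay hink)]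
    have hulen : (pvU grid H).length = H := by unfold pvU; simp
    have h1 : (pvU grid H).findIdx pvInkLayer = pvY0 grid H := rfl
    have h2 : (pvU grid H).reverse.findIdx pvInkLayer = pvKy grid H := rfl
    rw [h1, h2, hulen]
    have h3 : H - pvKy grid H - pvY0 grid H = pvHy grid H := rfl
    rw [h3]
    rw [pvSlice_as_range (pvU grid H) (pvY0 grid H) (pvHy grid H) [] (by rw [hulen]; omega)]
    apply List.map_congr_left
    intro j hj
    rw [List.mem_range] at hj
    unfold pvU
    rw [pvGetD_range_map _ _ _ _ (by omega)]
  -- stage 4: transpose back to layer-major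
  have hv : pvZipStar (pvDropEHT (pvU grid H)) =
      (List.range (pvDz grid)).map (fun i => (List.range (pvHy grid H)).map (fun j =>
        pvG2 grid (pvZ0 grid + i) (pvY0 grid H + j))) := by
    rw [hx1, pvZipStar_eq ("" : String) (pvDz grid) _ (by simp; omega)
      (by intro r hr
          obtain ⟨j, hj, rfl⟩ := List.mem_map.1 hr
          unfold pvUrow
          simp)]
    apply List.map_congr_left
    intro i hi
    rw [List.mem_range] at hi
    rw [List.map_map]
    apply List.map_congr_left
    intro j hj
    simp only [Function.comp_apply]
    unfold pvUrow
    rw [pvGetD_range_map _ _ _ _ hi]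
    rfl
  -- stage 5: rows become columns inside each layer
  have hx2 : (pvZipStar (pvDropEHT (pvU grid H))).map
      (fun layer => (pvZipStar (layer.map String.toList)).map (fun s => String.ofList s))
      = (List.range (pvDz grid)).map (fun i => (List.range W).map (fun x =>
          String.ofList ((List.range (pvHy grid H)).map (fun j =>
            pvG3 grid (pvZ0 grid + i) (pvY0 grid H + j) x)))) := by
    rw [hv]
    rw [List.map_map]
    apply List.map_congr_left
    intro i hi
    rw [List.mem_range] at hi
    simp only [Function.comp_apply]
    have hzi : pvZ0 grid + i < grid.length := by omega
    have hmem : grid.getD (pvZ0 grid + i) [] ∈ grid := by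
      rw [List.getD_eq_getElem (hn := hzi)]
      exact List.getElem_mem hzi
    rw [List.map_map]
    rw [pvZipStar_eq (' ' : Char) W _ (by simp; omega)
      (by intro r hr
          obtain ⟨j, hj, rfl⟩ := List.mem_map.1 hr
          rw [List.mem_range] at hj
          simp only [Function.comp_apply]
          apply hrow _ hmem
          unfold pvG2
          have hyj : pvY0 grid H + j < (grid.getD (pvZ0 grid + i) []).length := by
            rw [hlay _ hmem]; omega
          rw [List.getD_eq_getElem (hn := hyj)]
          exact List.getElem_mem hyj)]
    rw [List.map_map]
    apply List.map_congr_left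
    intro x hx
    rw [List.mem_range] at hx
    simp only [Function.comp_apply]
    congr 1
    rw [List.map_map]
    apply List.map_congr_left
    intro j hj
    simp only [Function.comp_apply]
    rfl
  -- stage 6: regroup by column index
  have ht3 : pvZipStar ((List.range (pvDz grid)).map (fun i => (List.range W).map (fun x =>
      String.ofList ((List.range (pvHy grid H)).map (fun j =>
        pvG3 grid (pvZ0 grid + i) (pvY0 grid H + j) x))))) = pvT3 grid H W := by
    rw [pvZipStar_eq ("" : String) W _ (by simp; omega)
      (by intro r hr
          obtain ⟨i, hi, rfl⟩ := List.mem_map.1 hr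
          simp)]
    unfold pvT3 pvCol
    apply List.map_congr_left
    intro x hx
    rw [List.mem_range] at hx
    rw [List.map_map]
    apply List.map_congr_left
    intro i hi
    rw [List.mem_range] at hi
    simp only [Function.comp_apply]
    rw [pvGetD_range_map _ _ _ _ hx]
  -- stage 7: drop blank columns left and right
  have hx3 : pvDropEHT (pvT3 grid H W) =
      (List.range (pvWx grid H W)).map (fun m => pvCol grid H (pvX0 grid H W + m)) := by
    rw [pvDropEHT_slice _ (pvT3ink grid H W hlay hrow hink)]
    have htlen : (pvT3 grid H W).length = W := by unfold pvT3; simp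
    have h1 : (pvT3 grid H W).findIdx pvInkLayer = pvX0 grid H W := rfl
    have h2 : (pvT3 grid H W).reverse.findIdx pvInkLayer = pvKx grid H W := rfl
    rw [h1, h2, htlen]
    have h3 : W - pvKx grid H W - pvX0 grid H W = pvWx grid H W := rfl
    rw [h3]
    rw [pvSlice_as_range (pvT3 grid H W) (pvX0 grid H W) (pvWx grid H W) [] (by rw [htlen]; omega)]
    apply List.map_congr_left
    intro m hm
    rw [List.mem_range] at hm
    unfold pvT3
    rw [pvGetD_range_map _ _ _ _ (by omega)]
  -- assemble
  rw [hu, hx2, ht3, hx3]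
  rw [pvZipStar_eq ("" : String) (pvDz grid) _ (by simp; omega)
    (by intro r hr
        obtain ⟨m, hm, rfl⟩ := List.mem_map.1 hr
        unfold pvCol
        simp)]
  unfold pvCanon
  rw [List.map_map]
  apply List.map_congr_left
  intro i hi
  rw [List.mem_range] at hi
  simp only [Function.comp_apply]
  have hcols : (List.map String.toList (List.map (fun row => row.getD i "")
      (List.map (fun m => pvCol grid H (pvX0 grid H W + m)) (List.range (pvWx grid H W))))) =
      (List.range (pvWx grid H W)).map (fun m =>
        (List.range (pvHy grid H)).map (fun j =>
          pvG3 grid (pvZ0 grid + i) (pvY0 grid H + j) (pvX0 grid H W + m))) := by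
    rw [List.map_map, List.map_map]
    apply List.map_congr_left
    intro m hm
    simp only [Function.comp_apply]
    unfold pvCol
    rw [pvGetD_range_map _ _ _ _ hi, String.toList_ofList]
  rw [hcols]
  rw [pvZipStar_eq (' ' : Char) (pvHy grid H) _ (by simp; omega)
    (by intro r hr
        obtain ⟨m, hm, rfl⟩ := List.mem_map.1 hr
        simp)]
  rw [List.map_map]
  apply List.map_congr_left
  intro j hj
  rw [List.mem_range] at hj
  simp only [Function.comp_apply]
  congr 1
  rw [List.map_map]
  apply List.map_congr_left
  intro m hm
  rw [List.mem_range] at hm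
  simp only [Function.comp_apply]
  rw [pvGetD_range_map _ _ _ _ hj]

theorem pvB_canon (grid : List (List String)) (H W : Nat)
    (hlay : ∀ layer ∈ grid, layer.length = H)
    (hrow : ∀ layer ∈ grid, ∀ row ∈ layer, row.toList.length = W)
    (hink : grid.any pvInkLayer = true) :
    ((grid.drop (pvSpan (grid.map (fun layer => layer.any (fun row => row.toList.any (fun c => !PySem.Chars.isspace c))))).1).take
        ((pvSpan (grid.map (fun layer => layer.any (fun row => row.toList.any (fun c => !PySem.Chars.isspace c))))).2 + 1 -
         (pvSpan (grid.map (fun layer => layer.any (fun row => row.toList.any (fun c => !PySem.Chars.isspace c))))).1)).map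
      (fun layer =>
        ((layer.drop (pvSpan ((List.range H).map (fun y => grid.any (fun layer =>
              (List.range W).any (fun x => !PySem.Chars.isspace (((layer.getD y "").toList).getD x ' ')))))).1).take
            ((pvSpan ((List.range H).map (fun y => grid.any (fun layer =>
              (List.range W).any (fun x => !PySem.Chars.isspace (((layer.getD y "").toList).getD x ' ')))))).2 + 1 -
             (pvSpan ((List.range H).map (fun y => grid.any (fun layer =>
              (List.range W).any (fun x => !PySem.Chars.isspace (((layer.getD y "").toList).getD x ' ')))))).1)).map
          (fun row =>
            String.ofList ((row.toList.drop (pvSpan ((List.range W).map (fun x => grid.any (fun layer =>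
                (List.range H).any (fun y => !PySem.Chars.isspace (((layer.getD y "").toList).getD x ' ')))))).1).take
              ((pvSpan ((List.range W).map (fun x => grid.any (fun layer =>
                (List.range H).any (fun y => !PySem.Chars.isspace (((layer.getD y "").toList).getD x ' ')))))).2 + 1 -
               (pvSpan ((List.range W).map (fun x => grid.any (fun layer =>
                (List.range H).any (fun y => !PySem.Chars.isspace (((layer.getD y "").toList).getD x ' ')))))).1))))
    = pvCanon grid H W := by
  obtain ⟨hDz1, hDzeq, hDzle, hkzle⟩ := pvDz_pos grid hink
  obtain ⟨hHy1, hHyle, hkyle⟩ := pvHy_pos grid H W hlay hink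
  obtain ⟨hWx1, hWxle, hkxle⟩ := pvWx_pos grid H W hlay hrow hink
  have hfunL : (fun layer : List String =>
      layer.any (fun row => row.toList.any (fun c => !PySem.Chars.isspace c))) = pvInkLayer := rfl
  have hzspan : pvSpan (grid.map pvInkLayer) = (pvZ0 grid, grid.length - 1 - pvKz grid) :=
    pvSpan_map _ _ hink
  rw [hfunL, hzspan]
  -- the y mask
  have hyanyeq : (pvU grid H).any pvInkLayer =
      (List.range H).any (fun y => grid.any (fun layer => (List.range W).any (fun x =>
        !PySem.Chars.isspace ((layer.getD y "").toList.getD x ' ')))) := by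
    unfold pvU
    rw [List.any_map]
    apply pvAny_congr
    intro y hy
    exact pvBridgeY grid H W hlay hrow hink y (List.mem_range.1 hy)
  have hyany : (List.range H).any (fun y => grid.any (fun layer => (List.range W).any (fun x =>
      !PySem.Chars.isspace ((layer.getD y "").toList.getD x ' ')))) = true := by
    rw [← hyanyeq]
    exact pvUink grid H W hlay hink
  have hyfind : (List.range H).findIdx (fun y => grid.any (fun layer => (List.range W).any (fun x =>
      !PySem.Chars.isspace ((layer.getD y "").toList.getD x ' ')))) = pvY0 grid H := by
    unfold pvY0 pvU
    rw [List.findIdx_map]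
    apply pvFindIdx_congr
    intro y hy
    exact (pvBridgeY grid H W hlay hrow hink y (List.mem_range.1 hy)).symm
  have hyfindrev : (List.range H).reverse.findIdx (fun y => grid.any (fun layer => (List.range W).any (fun x =>
      !PySem.Chars.isspace ((layer.getD y "").toList.getD x ' ')))) = pvKy grid H := by
    unfold pvKy pvU
    rw [← List.map_reverse, List.findIdx_map]
    apply pvFindIdx_congr
    intro y hy
    exact (pvBridgeY grid H W hlay hrow hink y (List.mem_range.1 (List.mem_reverse.1 hy))).symm
  have hyspan : pvSpan ((List.range H).map (fun y => grid.any (fun layer => (List.range W).any (fun x =>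
      !PySem.Chars.isspace ((layer.getD y "").toList.getD x ' '))))) = (pvY0 grid H, H - 1 - pvKy grid H) := by
    rw [pvSpan_map _ _ hyany, hyfind, hyfindrev, List.length_range]
  rw [hyspan]
  -- the x mask
  have hxanyeq : (pvT3 grid H W).any pvInkLayer =
      (List.range W).any (fun x => grid.any (fun layer => (List.range H).any (fun y =>
        !PySem.Chars.isspace ((layer.getD y "").toList.getD x ' ')))) := by
    unfold pvT3
    rw [List.any_map]
    apply pvAny_congr
    intro x hx
    exact pvBridgeX grid H W hlay hrow hink x (List.mem_range.1 hx)
  have hxany : (List.range W).any (fun x => grid.any (fun layer => (List.range H).any (fun y =>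
      !PySem.Chars.isspace ((layer.getD y "").toList.getD x ' ')))) = true := by
    rw [← hxanyeq]
    exact pvT3ink grid H W hlay hrow hink
  have hxfind : (List.range W).findIdx (fun x => grid.any (fun layer => (List.range H).any (fun y =>
      !PySem.Chars.isspace ((layer.getD y "").toList.getD x ' ')))) = pvX0 grid H W := by
    unfold pvX0 pvT3
    rw [List.findIdx_map]
    apply pvFindIdx_congr
    intro x hx
    exact (pvBridgeX grid H W hlay hrow hink x (List.mem_range.1 hx)).symm
  have hxfindrev : (List.range W).reverse.findIdx (fun x => grid.any (fun layer => (List.range H).any (fun y =>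
      !PySem.Chars.isspace ((layer.getD y "").toList.getD x ' ')))) = pvKx grid H W := by
    unfold pvKx pvT3
    rw [← List.map_reverse, List.findIdx_map]
    apply pvFindIdx_congr
    intro x hx
    exact (pvBridgeX grid H W hlay hrow hink x (List.mem_range.1 (List.mem_reverse.1 hx))).symm
  have hxspan : pvSpan ((List.range W).map (fun x => grid.any (fun layer => (List.range H).any (fun y =>
      !PySem.Chars.isspace ((layer.getD y "").toList.getD x ' '))))) = (pvX0 grid H W, W - 1 - pvKx grid H W) := by
    rw [pvSpan_map _ _ hxany, hxfind, hxfindrev, List.length_range]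
  rw [hxspan]
  dsimp only
  have ez : grid.length - 1 - pvKz grid + 1 - pvZ0 grid = pvDz grid := by unfold pvDz; omega
  have ey : H - 1 - pvKy grid H + 1 - pvY0 grid H = pvHy grid H := by unfold pvHy; omega
  have ex : W - 1 - pvKx grid H W + 1 - pvX0 grid H W = pvWx grid H W := by unfold pvWx; omega
  rw [ez, ey, ex]
  rw [pvSlice_as_range grid (pvZ0 grid) (pvDz grid) [] (by omega)]
  rw [List.map_map]
  unfold pvCanon
  apply List.map_congr_left
  intro i hi
  rw [List.mem_range] at hi
  have hzi : pvZ0 grid + i < grid.length := by omega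
  have hmem : grid.getD (pvZ0 grid + i) [] ∈ grid := by
    rw [List.getD_eq_getElem (hn := hzi)]
    exact List.getElem_mem hzi
  have hlenH : (grid.getD (pvZ0 grid + i) []).length = H := hlay _ hmem
  simp only [Function.comp_apply]
  rw [pvSlice_as_range (grid.getD (pvZ0 grid + i) []) (pvY0 grid H) (pvHy grid H) ""
    (by rw [hlenH]; omega)]
  rw [List.map_map]
  apply List.map_congr_left
  intro j hj
  rw [List.mem_range] at hj
  simp only [Function.comp_apply]
  have hyj : pvY0 grid H + j < (grid.getD (pvZ0 grid + i) []).length := by rw [hlenH]; omega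
  have hrmem : (grid.getD (pvZ0 grid + i) []).getD (pvY0 grid H + j) "" ∈
      grid.getD (pvZ0 grid + i) [] := by
    rw [List.getD_eq_getElem (hn := hyj)]
    exact List.getElem_mem hyj
  have hlenW : ((grid.getD (pvZ0 grid + i) []).getD (pvY0 grid H + j) "").toList.length = W :=
    hrow _ hmem _ hrmem
  rw [pvSlice_as_range _ (pvX0 grid H W) (pvWx grid H W) ' ' (by rw [hlenW]; omega)]
  rfl

theorem pvMain (chars : List (List String)) (hpre : Pre_crop_chars chars) :
    crop_chars chars = crop_chars_alt chars := by
  have hpre' : chars.any pvInkLayer = true := hpre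
  unfold crop_chars crop_chars_alt
  dsimp only
  rw [pvPad_eq]
  have hlay : ∀ layer ∈ chars.map (fun layer =>
        layer.map (fun row => pvLjust row (pvMaxLen ((chars.map (fun layer => layer.map (fun row => row.toList.length))).flatten))) ++
          List.replicate (pvMaxLen (chars.map List.length) - layer.length)
            (String.ofList (List.replicate (pvMaxLen ((chars.map (fun layer => layer.map (fun row => row.toList.length))).flatten)) ' '))),
      layer.length = pvMaxLen (chars.map List.length) := by
    intro layer hl
    obtain ⟨l0, hl0, rfl⟩ := List.mem_map.1 hl
    have hle : l0.length ≤ pvMaxLen (chars.map List.length) := by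
      unfold pvMaxLen
      exact pvLe_foldl_max _ 0 _ (List.mem_map_of_mem hl0)
    simp only [List.length_append, List.length_map, List.length_replicate]
    omega
  have hrow : ∀ layer ∈ chars.map (fun layer =>
        layer.map (fun row => pvLjust row (pvMaxLen ((chars.map (fun layer => layer.map (fun row => row.toList.length))).flatten))) ++
          List.replicate (pvMaxLen (chars.map List.length) - layer.length)
            (String.ofList (List.replicate (pvMaxLen ((chars.map (fun layer => layer.map (fun row => row.toList.length))).flatten)) ' '))),
      ∀ row ∈ layer, row.toList.length =
        pvMaxLen ((chars.map (fun layer => layer.map (fun row => row.toList.length))).flatten) := by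
    intro layer hl row hr
    obtain ⟨l0, hl0, rfl⟩ := List.mem_map.1 hl
    rcases List.mem_append.1 hr with h1 | h2
    · obtain ⟨r0, hr0, rfl⟩ := List.mem_map.1 h1
      have hle : r0.toList.length ≤
          pvMaxLen ((chars.map (fun layer => layer.map (fun row => row.toList.length))).flatten) := by
        unfold pvMaxLen
        apply pvLe_foldl_max _ 0
        apply List.mem_flatten.2
        exact ⟨l0.map (fun row => row.toList.length), List.mem_map_of_mem hl0,
          List.mem_map_of_mem hr0⟩
      unfold pvLjust
      rw [String.toList_ofList]
      simp only [List.length_append, List.length_replicate]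
      omega
    · rw [List.eq_of_mem_replicate h2, String.toList_ofList, List.length_replicate]
  have hink : (chars.map (fun layer =>
        layer.map (fun row => pvLjust row (pvMaxLen ((chars.map (fun layer => layer.map (fun row => row.toList.length))).flatten))) ++
          List.replicate (pvMaxLen (chars.map List.length) - layer.length)
            (String.ofList (List.replicate (pvMaxLen ((chars.map (fun layer => layer.map (fun row => row.toList.length))).flatten)) ' ')))).any
      pvInkLayer = true := by
    rw [List.any_eq_true] at hpre' ⊢
    obtain ⟨layer, hl, hlay2⟩ := hpre'
    refine ⟨_, List.mem_map_of_mem hl, ?_⟩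
    unfold pvInkLayer
    rw [List.any_append, List.any_map]
    have h1 : layer.any (pvInkStr ∘ fun row => pvLjust row (pvMaxLen ((chars.map (fun layer => layer.map (fun row => row.toList.length))).flatten))) = true := by
      rw [List.any_eq_true]
      obtain ⟨row, hrm, hri⟩ := List.any_eq_true.1 hlay2
      exact ⟨row, hrm, by simp only [Function.comp_apply, pvInkStr_ljust]; exact hri⟩
    rw [h1, Bool.true_or]
  rw [pvA_canon _ _ _ hlay hrow hink, pvB_canon _ _ _ hlay hrow hink]

-- ===== VERDICT (by name: the statement is the Claim_ definition above) =====
theorem crop_chars_spec : Claim_equal_crop_chars := by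
  intro chars _ hpre
  exact pvMain chars hpre
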